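-- pv_equiv track=rewrite | github.com/nioelumijkee/sss | pdss.py | find_canvas
-- ===== SOURCE A (Python) =====
-- def find_canvas(lpd, cnv):
--     st = -1
--     en = -1
--     find = 0
--     for i in range(len(lpd)):
--         l = lpd[i]
--         if len(l) >= 7:
--             if find == 0 and l[0] == '#N' and l[1] == 'canvas' and l[6] == cnv:
--                 find = 1
--                 st = i
--
--         if len(l) >= 6:
--             if find == 1 and l[0] == '#X' and l[1] == 'restore' and l[5] == cnv:
--                 en = i
--                 break
--     return(st, en)
-- ===== SOURCE B (Python) =====
-- def find_canvas(lpd, cnv):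
--     # single reverse pass: fe = first '#X restore ... cnv' index in the suffix lpd[i:];
--     # on a '#N canvas ... cnv' line, (st, en) = (i, fe) — the last such update (smallest i) wins.
--     st = en = fe = -1
--     for i in range(len(lpd) - 1, -1, -1):
--         l = lpd[i]
--         if len(l) >= 6 and l[0] == '#X' and l[1] == 'restore' and l[5] == cnv:
--             fe = i
--         if len(l) >= 7 and l[0] == '#N' and l[1] == 'canvas' and l[6] == cnv:
--             st, en = i, fe
--     return (st, en)
-- ===== Notes on version B (the rewrite author's own statement) =====
-- stated objective: alternative
-- what changed: Replaced A's forward flag-driven pass (st, en, find, with break) by a single reverse pass that maintains the first end-marker index of the current suffix and overwrites (st, en) at each start-marker line, so the last (leftmost) start wins with its matching end.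
import Mathlib
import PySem

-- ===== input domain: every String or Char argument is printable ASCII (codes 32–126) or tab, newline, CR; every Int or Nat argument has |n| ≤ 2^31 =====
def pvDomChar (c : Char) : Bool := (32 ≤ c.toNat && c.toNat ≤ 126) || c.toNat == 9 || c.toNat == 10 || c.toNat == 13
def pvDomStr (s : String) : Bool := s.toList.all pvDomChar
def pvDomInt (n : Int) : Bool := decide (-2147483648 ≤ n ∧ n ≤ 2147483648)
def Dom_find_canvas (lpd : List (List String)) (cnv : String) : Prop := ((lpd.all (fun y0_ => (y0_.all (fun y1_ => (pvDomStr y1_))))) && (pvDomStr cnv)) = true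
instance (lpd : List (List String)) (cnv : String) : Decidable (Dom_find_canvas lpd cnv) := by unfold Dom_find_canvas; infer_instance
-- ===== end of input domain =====

-- B replaces A's forward flag-driven pass by a single REVERSE pass that maintains the first end-marker
-- index of the current suffix and overwrites (st, en) at each start marker; objective: alternative.

-- ===== PORT A =====
-- single forward pass carrying (st, en, find), breaking on the end marker
def find_canvas_loopA (cnv : String) : List (List String) → Nat → Int → Int → Int → Int × Int
  | [], _, st, en, _ => (st, en)
  | l :: rest, i, st, en, find =>
    let p :=
      if l.length ≥ 7 then
        if find = 0 ∧ l.getD 0 "" = "#N" ∧ l.getD 1 "" = "canvas" ∧ l.getD 6 "" = cnv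
        then ((i : Int), (1 : Int))
        else (st, find)
      else (st, find)
    if l.length ≥ 6 then
      if p.2 = 1 ∧ l.getD 0 "" = "#X" ∧ l.getD 1 "" = "restore" ∧ l.getD 5 "" = cnv
      then (p.1, (i : Int))
      else find_canvas_loopA cnv rest (i + 1) p.1 en p.2
    else find_canvas_loopA cnv rest (i + 1) p.1 en p.2

def find_canvas (lpd : List (List String)) (cnv : String) : Int × Int :=
  find_canvas_loopA cnv lpd 0 (-1) (-1) 0

-- ===== PORT B =====
-- predicate for the '#N canvas … cnv' start line
def pvStartP (cnv : String) (l : List String) : Bool :=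
  decide (l.length ≥ 7) && (l.getD 0 "" == "#N") && (l.getD 1 "" == "canvas") && (l.getD 6 "" == cnv)

-- predicate for the '#X restore … cnv' end line
def pvEndP (cnv : String) (l : List String) : Bool :=
  decide (l.length ≥ 6) && (l.getD 0 "" == "#X") && (l.getD 1 "" == "restore") && (l.getD 5 "" == cnv)

-- B's reverse loop as structural right-recursion: for the suffix starting at index i it returns
-- ((st, en), fe) where fe is the first end-marker index in the suffix (-1 if none)
def find_canvas_loopB (cnv : String) : List (List String) → Nat → (Int × Int) × Int
  | [], _ => ((-1, -1), -1)
  | l :: rest, i =>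
    let r := find_canvas_loopB cnv rest (i + 1)
    let fe := if pvEndP cnv l then (i : Int) else r.2
    if pvStartP cnv l then (((i : Int), fe), fe) else (r.1, fe)

def find_canvas_alt (lpd : List (List String)) (cnv : String) : Int × Int :=
  (find_canvas_loopB cnv lpd 0).1

-- ===== PRECONDITION & SPEC =====
def Spec_find_canvas (lpd : List (List String)) (cnv : String) (out : Int × Int) : Prop := out = find_canvas_alt lpd cnv
instance (lpd : List (List String)) (cnv : String) (out : Int × Int) : Decidable (Spec_find_canvas lpd cnv out) := by unfold Spec_find_canvas; infer_instance

-- ===== CLAIM (what is proved, stated in full; the proofs are below) =====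
def Claim_equal_find_canvas : Prop := ∀ (lpd : List (List String)) (cnv : String), Dom_find_canvas lpd cnv → Spec_find_canvas lpd cnv (find_canvas lpd cnv)

-- ===== LEMMAS AND PROOFS =====

-- first index (counting from i along the list) whose element satisfies p (proof-side characterisation)
def pvFirstIdxFrom (p : List String → Bool) : List (List String) → Nat → Option Nat
  | [], _ => none
  | l :: rest, i => if p l then some i else pvFirstIdxFrom p rest (i + 1)

theorem pvStartP_iff (cnv : String) (l : List String) :
    pvStartP cnv l = true ↔
      (l.length ≥ 7 ∧ l.getD 0 "" = "#N" ∧ l.getD 1 "" = "canvas" ∧ l.getD 6 "" = cnv) := by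
  simp [pvStartP, and_assoc]

theorem pvEndP_iff (cnv : String) (l : List String) :
    pvEndP cnv l = true ↔
      (l.length ≥ 6 ∧ l.getD 0 "" = "#X" ∧ l.getD 1 "" = "restore" ∧ l.getD 5 "" = cnv) := by
  simp [pvEndP, and_assoc]

theorem stepA_p1_end (cnv : String) (l : List String) (rest : List (List String)) (i : Nat)
    (st en : Int) (he : pvEndP cnv l = true) :
    find_canvas_loopA cnv (l :: rest) i st en 1 = (st, (i : Int)) := by
  rw [pvEndP_iff] at he
  simp only [find_canvas_loopA]
  split_ifs <;> first | rfl | tauto | (exact absurd (by assumption) (by simp))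

theorem stepA_p1_noend (cnv : String) (l : List String) (rest : List (List String)) (i : Nat)
    (st en : Int) (he : ¬ pvEndP cnv l = true) :
    find_canvas_loopA cnv (l :: rest) i st en 1 = find_canvas_loopA cnv rest (i + 1) st en 1 := by
  rw [pvEndP_iff] at he
  simp only [find_canvas_loopA]
  split_ifs <;> first | rfl | tauto | (exact absurd (by assumption) (by simp))

theorem stepA_start_end (cnv : String) (l : List String) (rest : List (List String)) (i : Nat)
    (st en : Int) (hs : pvStartP cnv l = true) (he : pvEndP cnv l = true) :
    find_canvas_loopA cnv (l :: rest) i st en 0 = ((i : Int), (i : Int)) := by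
  rw [pvStartP_iff] at hs; rw [pvEndP_iff] at he
  simp only [find_canvas_loopA]
  split_ifs <;> first | rfl | tauto | (exact absurd (by assumption) (by simp))

theorem stepA_start_noend (cnv : String) (l : List String) (rest : List (List String)) (i : Nat)
    (st en : Int) (hs : pvStartP cnv l = true) (he : ¬ pvEndP cnv l = true) :
    find_canvas_loopA cnv (l :: rest) i st en 0 =
      find_canvas_loopA cnv rest (i + 1) (i : Int) en 1 := by
  rw [pvStartP_iff] at hs; rw [pvEndP_iff] at he
  simp only [find_canvas_loopA]
  split_ifs <;> first | rfl | tauto | (exact absurd (by assumption) (by simp))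

theorem stepA_nostart (cnv : String) (l : List String) (rest : List (List String)) (i : Nat)
    (st en : Int) (hs : ¬ pvStartP cnv l = true) :
    find_canvas_loopA cnv (l :: rest) i st en 0 =
      find_canvas_loopA cnv rest (i + 1) st en 0 := by
  rw [pvStartP_iff] at hs
  simp only [find_canvas_loopA]
  split_ifs <;> first | rfl | tauto | (exact absurd (by assumption) (by simp))

theorem pvFirstIdxFrom_ge (p : List String → Bool) :
    ∀ (xs : List (List String)) (i st : Nat), pvFirstIdxFrom p xs i = some st → i ≤ st := by
  intro xs
  induction xs with
  | nil => intro i st h; simp [pvFirstIdxFrom] at h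
  | cons l rest ih =>
    intro i st h
    simp only [pvFirstIdxFrom] at h
    by_cases hp : p l = true
    · simp [hp] at h; omega
    · simp [hp] at h; have := ih (i + 1) st h; omega

theorem loop_phase1 (cnv : String) :
    ∀ (xs : List (List String)) (i : Nat) (st en : Int),
      find_canvas_loopA cnv xs i st en 1 =
        (st, match pvFirstIdxFrom (pvEndP cnv) xs i with
             | none => en
             | some e => (e : Int)) := by
  intro xs
  induction xs with
  | nil => intro i st en; simp [find_canvas_loopA, pvFirstIdxFrom]
  | cons l rest ih =>
    intro i st en
    by_cases he : pvEndP cnv l = true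
    · rw [stepA_p1_end cnv l rest i st en he]
      simp [pvFirstIdxFrom, he]
    · rw [stepA_p1_noend cnv l rest i st en he, ih (i + 1) st en]
      have : pvEndP cnv l = false := by simpa using he
      simp [pvFirstIdxFrom, this]

theorem loop_phase0 (cnv : String) :
    ∀ (xs : List (List String)) (i : Nat),
      find_canvas_loopA cnv xs i (-1) (-1) 0 =
        (match pvFirstIdxFrom (pvStartP cnv) xs i with
         | none => ((-1 : Int), (-1 : Int))
         | some st =>
           ((st : Int), match pvFirstIdxFrom (pvEndP cnv) (xs.drop (st - i)) st with
                        | none => (-1 : Int)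
                        | some e => (e : Int))) := by
  intro xs
  induction xs with
  | nil => intro i; simp [find_canvas_loopA, pvFirstIdxFrom]
  | cons l rest ih =>
    intro i
    by_cases hs : pvStartP cnv l = true
    · have hfi : pvFirstIdxFrom (pvStartP cnv) (l :: rest) i = some i := by
        simp [pvFirstIdxFrom, hs]
      rw [hfi]
      simp only [Nat.sub_self, List.drop_zero]
      by_cases he : pvEndP cnv l = true
      · rw [stepA_start_end cnv l rest i (-1) (-1) hs he]
        simp [pvFirstIdxFrom, he]
      · rw [stepA_start_noend cnv l rest i (-1) (-1) hs he,
          loop_phase1 cnv rest (i + 1) (i : Int) (-1)]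
        have : pvEndP cnv l = false := by simpa using he
        simp [pvFirstIdxFrom, this]
    · rw [stepA_nostart cnv l rest i (-1) (-1) hs, ih (i + 1)]
      have hsf : pvStartP cnv l = false := by simpa using hs
      simp only [pvFirstIdxFrom, hsf, Bool.false_eq_true, if_false]
      cases hfi : pvFirstIdxFrom (pvStartP cnv) rest (i + 1) with
      | none => rfl
      | some st =>
        have hge := pvFirstIdxFrom_ge (pvStartP cnv) rest (i + 1) st hfi
        have hdrop : (l :: rest).drop (st - i) = rest.drop (st - (i + 1)) := by
          have h1 : st - i = (st - (i + 1)) + 1 := by omega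
          rw [h1]; rfl
        simp only [hdrop]

-- characterisation of B's reverse loop by the same first-index searches
theorem loopB_char (cnv : String) :
    ∀ (xs : List (List String)) (i : Nat),
      find_canvas_loopB cnv xs i =
        ((match pvFirstIdxFrom (pvStartP cnv) xs i with
          | none => ((-1 : Int), (-1 : Int))
          | some st =>
            ((st : Int), match pvFirstIdxFrom (pvEndP cnv) (xs.drop (st - i)) st with
                         | none => (-1 : Int)
                         | some e => (e : Int))),
         match pvFirstIdxFrom (pvEndP cnv) xs i with
         | none => (-1 : Int)
         | some e => (e : Int)) := by
  intro xs
  induction xs with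
  | nil => intro i; simp [find_canvas_loopB, pvFirstIdxFrom]
  | cons l rest ih =>
    intro i
    simp only [find_canvas_loopB, ih (i + 1)]
    by_cases hs : pvStartP cnv l = true
    · by_cases he : pvEndP cnv l = true
      · simp [pvFirstIdxFrom, hs, he]
      · have hef : pvEndP cnv l = false := by simpa using he
        simp [pvFirstIdxFrom, hs, hef]
    · have hsf : pvStartP cnv l = false := by simpa using hs
      by_cases he : pvEndP cnv l = true
      · simp only [pvFirstIdxFrom, hsf, Bool.false_eq_true, if_false, he, if_true]
        cases hfi : pvFirstIdxFrom (pvStartP cnv) rest (i + 1) with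
        | none => rfl
        | some st =>
          have hge := pvFirstIdxFrom_ge (pvStartP cnv) rest (i + 1) st hfi
          have hdrop : (l :: rest).drop (st - i) = rest.drop (st - (i + 1)) := by
            have h1 : st - i = (st - (i + 1)) + 1 := by omega
            rw [h1]; rfl
          simp only [hdrop]
      · have hef : pvEndP cnv l = false := by simpa using he
        simp only [pvFirstIdxFrom, hsf, hef, Bool.false_eq_true, if_false]
        cases hfi : pvFirstIdxFrom (pvStartP cnv) rest (i + 1) with
        | none => rfl
        | some st =>
          have hge := pvFirstIdxFrom_ge (pvStartP cnv) rest (i + 1) st hfi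
          have hdrop : (l :: rest).drop (st - i) = rest.drop (st - (i + 1)) := by
            have h1 : st - i = (st - (i + 1)) + 1 := by omega
            rw [h1]; rfl
          simp only [hdrop]

-- ===== VERDICT (by name: the statement is the Claim_ definition above) =====
theorem find_canvas_spec : Claim_equal_find_canvas := by
  intro lpd cnv _
  show find_canvas lpd cnv = find_canvas_alt lpd cnv
  unfold find_canvas find_canvas_alt
  rw [loop_phase0 cnv lpd 0, loopB_char cnv lpd 0]
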